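-- pv_equiv track=rewrite | github.com/Gayang2902/boj | greedy/19941.py | solution
-- ===== SOURCE A (Python) =====
-- def solution(N, K, A):
--     cnt = 0
--
--     for i in range(N):
--         if A[i] == 'H':
--             continue
--         # 뒷사람을 위해 앞사람들이 뒷사람들에게서 가장 먼 (여기서는 왼쪽) 햄버거를 먹어주어야 함
--         for j in range(i - K, i + K + 1):
--             if 0 <= j < N:
--                 if A[j] == 'H':
--                     A[j] = '-'
--                     cnt += 1
--                     break
--
--     return cnt
-- ===== SOURCE B (Python) =====
-- def solution(N, K, A):
--     """Eating simulation: each slot that does not currently hold a burger eats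
--     the leftmost remaining burger within distance K.  Instead of rescanning a
--     2K+1 window for every eater, keep the burger positions in a list and move a
--     monotone pointer past positions that are out of range or already eaten.
--     Works on a copy, so the input list is not mutated (return value only)."""
--     state = list(A)
--     burgers = [i for i in range(N) if state[i] == 'H']
--     p = 0
--     cnt = 0
--     for i in range(N):
--         if state[i] == 'H':
--             continue
--         while p < len(burgers) and (burgers[p] < i - K or state[burgers[p]] != 'H'):
--             p += 1
--         if p < len(burgers) and burgers[p] <= i + K:
--             state[burgers[p]] = '-'
--             cnt += 1
--     return cnt
-- ===== Notes on version B (the rewrite author's own statement) =====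
-- stated objective: faster
-- what changed: Replaced A's O(K)-wide window rescan per eater with a single pass that precomputes the burger positions and advances a monotone pointer past out-of-range or already-eaten positions (lazy deletion); B works on a copy, so unlike A it does not mutate the argument (return value only). Pre_ excludes only N > len(A), where A raises IndexError.
import Mathlib
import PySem

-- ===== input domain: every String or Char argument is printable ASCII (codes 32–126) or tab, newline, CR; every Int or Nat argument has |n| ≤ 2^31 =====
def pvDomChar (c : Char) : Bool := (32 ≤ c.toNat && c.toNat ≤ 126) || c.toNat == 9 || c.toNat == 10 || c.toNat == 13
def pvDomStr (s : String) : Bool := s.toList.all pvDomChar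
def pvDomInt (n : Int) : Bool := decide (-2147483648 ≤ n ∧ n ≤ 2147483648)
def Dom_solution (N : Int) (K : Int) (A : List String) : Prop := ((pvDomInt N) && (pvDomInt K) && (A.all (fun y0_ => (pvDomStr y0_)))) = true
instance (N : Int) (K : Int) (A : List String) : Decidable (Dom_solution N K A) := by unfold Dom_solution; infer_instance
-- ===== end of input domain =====

-- B replaces A's per-eater rescan of the whole 2K+1 window by a precomputed list of burger
-- positions and a monotone pointer (objective: faster). A mutates its argument list in place,
-- B works on a copy: the equivalence proved here is about the return value only.

-- ===== PORT A =====
-- inner 'for j in range(i - K, i + K + 1): …  break' loop of A, over state (list, cnt)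
def aInner (N : Int) (js : List Int) (st : List String × Int) : List String × Int :=
  match js with
  | [] => st
  | j :: rest =>
    if 0 ≤ j ∧ j < N then
      if PySem.List.pyGetD st.1 j "" = "H" then (st.1.set j.toNat "-", st.2 + 1)
      else aInner N rest st
    else aInner N rest st

-- body of A's outer 'for i in range(N)' loop
def aBody (N : Int) (K : Int) (st : List String × Int) (i : Int) : List String × Int :=
  if PySem.List.pyGetD st.1 i "" = "H" then st
  else aInner N (PySem.List.pyRange (i - K) (i + K + 1) 1) st

def solution (N : Int) (K : Int) (A : List String) : Int :=
  ((PySem.List.pyRange 0 N 1).foldl (aBody N K) (A, (0 : Int))).2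

-- ===== PORT B =====
-- burgers = [i for i in range(N) if state[i] == 'H']   (state = list(A) at this point)
def availOf (N : Int) (A : List String) : List Int :=
  (PySem.List.pyRange 0 N 1).filter (fun i => PySem.List.pyGetD A i "" = "H")

-- 'while p < len(burgers) and (burgers[p] < i - K or state[burgers[p]] != "H"): p += 1'
def bAdv (avail : List Int) (st : List String) (lo : Int) (p : Nat) : Nat :=
  if h : p < avail.length then
    if avail[p] < lo ∨ PySem.List.pyGetD st avail[p] "" ≠ "H" then bAdv avail st lo (p + 1)
    else p
  else p
termination_by avail.length - p

-- body of B's single for-loop, over state (state, p, cnt)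
def bStep (K : Int) (avail : List Int) (st : List String × Nat × Int) (i : Int) :
    List String × Nat × Int :=
  if PySem.List.pyGetD st.1 i "" = "H" then st
  else
    let p := bAdv avail st.1 (i - K) st.2.1
    if h : p < avail.length then
      if avail[p] ≤ i + K then (st.1.set (avail[p]).toNat "-", p, st.2.2 + 1)
      else (st.1, p, st.2.2)
    else (st.1, p, st.2.2)

def solution_alt (N : Int) (K : Int) (A : List String) : Int :=
  ((PySem.List.pyRange 0 N 1).foldl (bStep K (availOf N A)) (A, 0, (0 : Int))).2.2

-- ===== PRECONDITION & SPEC =====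
-- Pre_ excludes only N > len(A): there the Python A raises IndexError (so does B).
def Pre_solution (N : Int) (K : Int) (A : List String) : Prop := N ≤ (A.length : Int)
instance (N : Int) (K : Int) (A : List String) : Decidable (Pre_solution N K A) := by
  unfold Pre_solution; infer_instance

def pvWitness_solution : Int × Int × List String := (3, 1, ["P", "H", "H"])

def Spec_solution (N : Int) (K : Int) (A : List String) (out : Int) : Prop := out = solution_alt N K A
instance (N : Int) (K : Int) (A : List String) (out : Int) : Decidable (Spec_solution N K A out) := by
  unfold Spec_solution; infer_instance

-- ===== CLAIM (what is proved, stated in full; the proofs are below) =====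
def Claim_equal_solution : Prop := ∀ (N : Int) (K : Int) (A : List String),
  Dom_solution N K A → Pre_solution N K A → Spec_solution N K A (solution N K A)

-- ===== LEMMAS AND PROOFS =====

-- pyGetD at a nonnegative Int index is List.getD at its toNat
lemma pyGetD_toNat {α : Type} (xs : List α) (d : α) (i : Int) (h0 : 0 ≤ i) :
    PySem.List.pyGetD xs i d = xs.getD i.toNat d := by
  have := PySem.List.pyGetD_natCast (xs := xs) (n := i.toNat) (d := d)
  rwa [Int.toNat_of_nonneg h0] at this

lemma getD_set_self {α : Type} (l : List α) (n : Nat) (a d : α) (h : n < l.length) :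
    (l.set n a).getD n d = a := by
  simp [List.getD_eq_getElem?_getD, List.getElem?_set_self h]

lemma getD_set_ne {α : Type} (l : List α) (n m : Nat) (a d : α) (h : n ≠ m) :
    (l.set n a).getD m d = l.getD m d := by
  simp [List.getD_eq_getElem?_getD, List.getElem?_set_ne h]

-- membership in the burger-position list
lemma mem_availOf {N : Int} {A : List String} {x : Int} :
    x ∈ availOf N A ↔ (0 ≤ x ∧ x < N) ∧ A.getD x.toNat "" = "H" := by
  unfold availOf
  rw [List.mem_filter, PySem.List.mem_pyRange_one]
  constructor
  · rintro ⟨⟨h0, h1⟩, h2⟩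
    rw [pyGetD_toNat _ _ _ h0] at h2
    exact ⟨⟨h0, h1⟩, by simpa using h2⟩
  · rintro ⟨⟨h0, h1⟩, h2⟩
    refine ⟨⟨h0, h1⟩, ?_⟩
    rw [pyGetD_toNat _ _ _ h0]
    simpa using h2

lemma avail_pairwise (N : Int) (A : List String) : (availOf N A).Pairwise (· < ·) :=
  List.Pairwise.filter _ (PySem.List.pairwise_lt_pyRange_one 0 N)

lemma avail_mono {N : Int} {A : List String} {q q' : Nat} (hij : q < q')
    (hj : q' < (availOf N A).length) :
    (availOf N A)[q]'(by omega) < (availOf N A)[q'] :=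
  List.pairwise_iff_getElem.mp (avail_pairwise N A) q q' (by omega) hj hij

-- characterisation of A's inner loop as 'first qualifying j'
lemma aInner_eq (N : Int) (js : List Int) (st : List String × Int) :
    aInner N js st =
      match js.find? (fun j => decide ((0 ≤ j ∧ j < N) ∧ PySem.List.pyGetD st.1 j "" = "H")) with
      | none => st
      | some j => (st.1.set j.toNat "-", st.2 + 1) := by
  induction js with
  | nil => simp [aInner]
  | cons j rest ih =>
    by_cases h1 : 0 ≤ j ∧ j < N
    · by_cases h2 : PySem.List.pyGetD st.1 j "" = "H"
      · rw [List.find?_cons_of_pos (by simp [h1, h2])]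
        simp [aInner, h1, h2]
      · rw [List.find?_cons_of_neg (by simp [h1, h2])]
        simp only [aInner, if_pos h1, if_neg h2]
        exact ih
    · rw [List.find?_cons_of_neg (by simp [h1])]
      simp only [aInner, if_neg h1]
      exact ih

-- find? on a strictly increasing list returns the minimal satisfying element
lemma find?_min (P : Int → Bool) : ∀ (R : List Int), R.Pairwise (· < ·) →
    ∀ x : Int, x ∈ R → P x = true → (∀ y ∈ R, y < x → P y = false) → R.find? P = some x := by
  intro R
  induction R with
  | nil => intro _ x hx; cases hx
  | cons r rest ih =>
    intro hs x hx hPx hmin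
    rcases List.pairwise_cons.mp hs with ⟨hr, hs'⟩
    by_cases hPr : P r = true
    · have hxr : x = r := by
        rcases List.mem_cons.mp hx with h | hx'
        · exact h
        · exact absurd hPr (by rw [hmin r (List.mem_cons_self) (hr x hx')]; simp)
      rw [List.find?_cons_of_pos hPr, hxr]
    · have hx' : x ∈ rest := by
        rcases List.mem_cons.mp hx with h | h
        · exact absurd hPx (h ▸ hPr)
        · exact h
      rw [List.find?_cons_of_neg hPr]
      exact ih hs' x hx' hPx (fun y hy hyx => hmin y (List.mem_cons_of_mem _ hy) hyx)

-- full specification of the while-loop bAdv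
lemma adv_spec (l : List Int) (st : List String) (lo : Int) : ∀ (d p : Nat), l.length - p = d →
    p ≤ bAdv l st lo p ∧
    (∀ q, p ≤ q → q < bAdv l st lo p → ∀ (hq : q < l.length),
      l[q] < lo ∨ PySem.List.pyGetD st l[q] "" ≠ "H") ∧
    (p ≤ l.length → bAdv l st lo p ≤ l.length) ∧
    (∀ (h : bAdv l st lo p < l.length),
      ¬ (l[bAdv l st lo p] < lo ∨ PySem.List.pyGetD st l[bAdv l st lo p] "" ≠ "H")) := by
  intro d
  induction d with
  | zero =>
    intro p hd
    have hp : ¬ p < l.length := by omega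
    rw [bAdv, dif_neg hp]
    exact ⟨le_refl _, by omega, by omega, fun h => absurd h hp⟩
  | succ d ih =>
    intro p hd
    by_cases hp : p < l.length
    · rw [bAdv, dif_pos hp]
      by_cases hlt : l[p] < lo ∨ PySem.List.pyGetD st l[p] "" ≠ "H"
      · rw [if_pos hlt]
        obtain ⟨h1, h2, h3, h4⟩ := ih (p + 1) (by omega)
        refine ⟨by omega, ?_, fun _ => h3 (by omega), h4⟩
        intro q hq1 hq2 hqlen
        rcases eq_or_lt_of_le hq1 with h | h
        · subst h; exact hlt
        · exact h2 q (by omega) hq2 hqlen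
      · rw [if_neg hlt]
        exact ⟨le_refl _, by omega, fun h => h, fun _ => hlt⟩
    · rw [bAdv, dif_neg hp]
      exact ⟨le_refl _, by omega, by omega, fun h => absurd h hp⟩

-- the coupling invariant between A's state (list, cnt) and B's state (state, p, cnt),
-- before processing index i
structure InvP (N K : Int) (A : List String) (avail : List Int) (i : Int)
    (sA : List String × Int) (sB : List String × Nat × Int) : Prop where
  list : sB.1 = sA.1
  cnt : sA.2 = sB.2.2
  alen : sA.1.length = A.length
  sub : ∀ j : Nat, j < A.length → sA.1.getD j "" = "H" → A.getD j "" = "H"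
  plen : sB.2.1 ≤ avail.length
  skipped : ∀ q : Nat, (h : q < avail.length) → q < sB.2.1 →
    avail[q] < i - K ∨ sA.1.getD (avail[q]).toNat "" ≠ "H"

lemma step_pres (N K : Int) (A : List String) (hN : N ≤ (A.length : Int)) (i : Int)
    (hi0 : 0 ≤ i) (hiN : i < N) (sA : List String × Int) (sB : List String × Nat × Int)
    (hInv : InvP N K A (availOf N A) i sA sB) :
    InvP N K A (availOf N A) (i + 1) (aBody N K sA i) (bStep K (availOf N A) sB i) := by
  set avail := availOf N A with havdef
  have hBcond : PySem.List.pyGetD sB.1 i "" = PySem.List.pyGetD sA.1 i "" := by rw [hInv.list]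
  by_cases hP : PySem.List.pyGetD sA.1 i "" = "H"
  -- slot currently holds a burger: both sides skip
  · rw [aBody, if_pos hP, bStep, if_pos (hBcond.trans hP)]
    refine ⟨hInv.list, hInv.cnt, hInv.alen, hInv.sub, hInv.plen, fun q h hq => ?_⟩
    rcases hInv.skipped q h hq with h' | h'
    · exact Or.inl (by omega)
    · exact Or.inr h'
  -- eater: A scans the window, B advances the pointer
  · set p := sB.2.1 with hpdef
    set p' := bAdv avail sA.1 (i - K) p with hp'def
    have hBadv : bAdv avail sB.1 (i - K) p = p' := by rw [hInv.list]
    obtain ⟨hg0, hs0, hl0, ht0⟩ := adv_spec avail sA.1 (i - K) (avail.length - p) p rfl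
    rw [← hp'def] at hg0 hs0 hl0 ht0
    have hple : p' ≤ avail.length := hl0 hInv.plen
    -- every pointer index below p' is unusable at time i
    have hskip' : ∀ q : Nat, (h : q < avail.length) → q < p' →
        avail[q] < i - K ∨ sA.1.getD (avail[q]).toNat "" ≠ "H" := by
      intro q h hq
      rcases Nat.lt_or_ge q p with hqp | hqp
      · exact hInv.skipped q h hqp
      · rcases hs0 q hqp hq h with h' | h'
        · exact Or.inl h'
        · right
          intro hc
          apply h'
          rw [pyGetD_toNat _ _ _ (mem_availOf.mp (List.getElem_mem _)).1.1]
          exact hc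
    -- the Bool predicate that A's inner loop tests
    have hpredT : ∀ y : Int,
        decide ((0 ≤ y ∧ y < N) ∧ PySem.List.pyGetD sA.1 y "" = "H") = true ↔
        ((0 ≤ y ∧ y < N) ∧ sA.1.getD y.toNat "" = "H") := by
      intro y
      rw [decide_eq_true_iff]
      constructor
      · rintro ⟨⟨h0, h1⟩, h2⟩
        rw [pyGetD_toNat _ _ _ h0] at h2
        exact ⟨⟨h0, h1⟩, h2⟩
      · rintro ⟨⟨h0, h1⟩, h2⟩
        exact ⟨⟨h0, h1⟩, by rw [pyGetD_toNat _ _ _ h0]; exact h2⟩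
    -- an in-window available position never sits at a pointer index < p'
    have hnotlow : ∀ (y : Int), i - K ≤ y → 0 ≤ y → y < N → sA.1.getD y.toNat "" = "H" →
        ∀ (q : Nat) (hq : q < avail.length), avail[q] = y → p' ≤ q := by
      intro y hyK hy0 hyN hyH q hq hyq
      by_contra hqp'
      rcases hskip' q hq (by omega) with h' | h'
      · rw [hyq] at h'; omega
      · rw [hyq] at h'; exact h' hyH
    -- an available in-window position is in avail
    have hmem_of : ∀ (y : Int), 0 ≤ y → y < N → sA.1.getD y.toNat "" = "H" → y ∈ avail := by
      intro y h0 h1 h2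
      have hyA : y.toNat < A.length := by omega
      exact mem_availOf.mpr ⟨⟨h0, h1⟩, hInv.sub y.toNat hyA h2⟩
    rw [aBody, if_neg hP, aInner_eq, bStep, if_neg (by rw [hBcond]; exact hP)]
    simp only [← hpdef, hBadv]
    by_cases hp'len : p' < avail.length
    · have hstop := ht0 hp'len
      push Not at hstop
      obtain ⟨hj₀lo, hj₀H'⟩ := hstop
      rw [dif_pos hp'len]
      set j₀ : Int := avail[p']'hp'len with hj₀
      have hj₀mem : j₀ ∈ avail := List.getElem_mem _
      obtain ⟨⟨hj₀0, hj₀N⟩, _⟩ := mem_availOf.mp hj₀mem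
      have hj₀H : sA.1.getD j₀.toNat "" = "H" := by
        rw [pyGetD_toNat _ _ _ hj₀0] at hj₀H'; exact hj₀H'
      have hj₀A : j₀.toNat < A.length := by omega
      by_cases hle : j₀ ≤ i + K
      · rw [if_pos hle]
        -- A's find? returns exactly j₀
        have hfind : (PySem.List.pyRange (i - K) (i + K + 1) 1).find?
            (fun j => decide ((0 ≤ j ∧ j < N) ∧ PySem.List.pyGetD sA.1 j "" = "H")) = some j₀ := by
          apply find?_min _ _ (PySem.List.pairwise_lt_pyRange_one _ _)
          · exact PySem.List.mem_pyRange_one.mpr ⟨by omega, by omega⟩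
          · exact (hpredT j₀).mpr ⟨⟨hj₀0, hj₀N⟩, hj₀H⟩
          · intro y hy hyx
            rcases PySem.List.mem_pyRange_one.mp hy with ⟨hy1, hy2⟩
            by_contra hPy
            obtain ⟨⟨hy0, hyN⟩, hyH⟩ := (hpredT y).mp (by
              rcases Bool.eq_false_or_eq_true
                (decide ((0 ≤ y ∧ y < N) ∧ PySem.List.pyGetD sA.1 y "" = "H")) with h | h
              · exact h
              · exact absurd h hPy)
            obtain ⟨q, hq, hyq⟩ := List.getElem_of_mem (hmem_of y hy0 hyN hyH)
            have hq1 : p' ≤ q := hnotlow y hy1 hy0 hyN hyH q hq hyq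
            have : j₀ ≤ y := by
              rcases Nat.eq_or_lt_of_le hq1 with h | h
              · subst h; exact le_of_eq (hj₀.trans hyq)
              · exact le_of_lt (by rw [hj₀, ← hyq]; exact avail_mono h hq)
            omega
        rw [hfind]
        simp only []
        refine ⟨by rw [hInv.list], by simp [hInv.cnt], by simp [hInv.alen], ?_, by omega, ?_⟩
        · intro j hj hH
          by_cases hjj : j = j₀.toNat
          · subst hjj
            rw [getD_set_self _ _ _ _ (by rw [hInv.alen]; exact hj₀A)] at hH
            exact absurd hH (by decide)
          · rw [getD_set_ne _ _ _ _ _ (fun h => hjj h.symm)] at hH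
            exact hInv.sub j hj hH
        · intro q h hq
          rcases hskip' q h hq with h' | h'
          · exact Or.inl (by omega)
          · right
            by_cases hjj : (avail[q]'h).toNat = j₀.toNat
            · rw [hjj, getD_set_self _ _ _ _ (by rw [hInv.alen]; exact hj₀A)]
              decide
            · rw [getD_set_ne _ _ _ _ _ (fun h2 => hjj h2.symm)]
              exact h'
      · rw [if_neg hle]
        -- no available burger in the window: A's find? returns none
        have hfind : (PySem.List.pyRange (i - K) (i + K + 1) 1).find?
            (fun j => decide ((0 ≤ j ∧ j < N) ∧ PySem.List.pyGetD sA.1 j "" = "H")) = none := by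
          rw [List.find?_eq_none]
          intro y hy hPy
          rcases PySem.List.mem_pyRange_one.mp hy with ⟨hy1, hy2⟩
          obtain ⟨⟨hy0, hyN⟩, hyH⟩ := (hpredT y).mp hPy
          obtain ⟨q, hq, hyq⟩ := List.getElem_of_mem (hmem_of y hy0 hyN hyH)
          have hq1 : p' ≤ q := hnotlow y hy1 hy0 hyN hyH q hq hyq
          have : j₀ ≤ y := by
            rcases Nat.eq_or_lt_of_le hq1 with h | h
            · subst h; exact le_of_eq (hj₀.trans hyq)
            · exact le_of_lt (by rw [hj₀, ← hyq]; exact avail_mono h hq)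
          omega
        rw [hfind]
        simp only []
        refine ⟨hInv.list, hInv.cnt, hInv.alen, hInv.sub, hple, ?_⟩
        intro q h hq
        rcases hskip' q h hq with h' | h'
        · exact Or.inl (by omega)
        · exact Or.inr h'
    · rw [dif_neg hp'len]
      have hp'eq : p' = avail.length := by omega
      have hfind : (PySem.List.pyRange (i - K) (i + K + 1) 1).find?
          (fun j => decide ((0 ≤ j ∧ j < N) ∧ PySem.List.pyGetD sA.1 j "" = "H")) = none := by
        rw [List.find?_eq_none]
        intro y hy hPy
        rcases PySem.List.mem_pyRange_one.mp hy with ⟨hy1, hy2⟩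
        obtain ⟨⟨hy0, hyN⟩, hyH⟩ := (hpredT y).mp hPy
        obtain ⟨q, hq, hyq⟩ := List.getElem_of_mem (hmem_of y hy0 hyN hyH)
        have hq1 : p' ≤ q := hnotlow y hy1 hy0 hyN hyH q hq hyq
        omega
      rw [hfind]
      simp only []
      refine ⟨hInv.list, hInv.cnt, hInv.alen, hInv.sub, hple, ?_⟩
      intro q h hq
      rcases hskip' q h hq with h' | h'
      · exact Or.inl (by omega)
      · exact Or.inr h'

lemma fold_inv (N K : Int) (A : List String) (hN : N ≤ (A.length : Int)) :
    ∀ (n : Nat) (i : Int) (sA : List String × Int) (sB : List String × Nat × Int),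
      N - i ≤ n → 0 ≤ i → InvP N K A (availOf N A) i sA sB →
      ((PySem.List.pyRange i N 1).foldl (aBody N K) sA).2 =
        ((PySem.List.pyRange i N 1).foldl (bStep K (availOf N A)) sB).2.2 := by
  intro n
  induction n with
  | zero =>
    intro i sA sB hn hi hInv
    rw [PySem.List.pyRange_one_eq_nil (by omega)]
    exact hInv.cnt
  | succ n ih =>
    intro i sA sB hn hi hInv
    by_cases hiN : i < N
    · rw [PySem.List.pyRange_one_cons hiN]
      simp only [List.foldl_cons]
      exact ih (i + 1) _ _ (by omega) (by omega)
        (step_pres N K A hN i hi hiN sA sB hInv)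
    · rw [PySem.List.pyRange_one_eq_nil (by omega)]
      exact hInv.cnt

-- ===== VERDICT (by name: the statement is the Claim_ definition above) =====
theorem solution_spec : Claim_equal_solution := by
  intro N K A _ hPre
  unfold Spec_solution solution solution_alt
  apply fold_inv N K A hPre N.toNat 0 _ _ (by omega) (le_refl 0)
  exact ⟨rfl, rfl, rfl, fun j hj h => h, Nat.zero_le _,
    fun q h hq => absurd hq (Nat.not_lt_zero q)⟩
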